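-- pv_equiv track=rewrite | github.com/ydb-platform/ydb | contrib/python/Cartopy/cartopy/io/img_tiles.py | quadkey_to_tms
-- ===== SOURCE A (Python) =====
-- def quadkey_to_tms(quadkey, google=False):
--     # algorithm ported from
--     # https://msdn.microsoft.com/en-us/library/bb259689.aspx
--     assert isinstance(quadkey, str), 'quadkey must be a string'
--
--     x = y = 0
--     z = len(quadkey)
--     for i in range(z, 0, -1):
--         mask = 1 << (i - 1)
--         if quadkey[z - i] == '0':
--             pass
--         elif quadkey[z - i] == '1':
--             x |= mask
--         elif quadkey[z - i] == '2':
--             y |= mask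
--         elif quadkey[z - i] == '3':
--             x |= mask
--             y |= mask
--         else:
--             raise ValueError(f'Invalid QuadKey digit sequence: {quadkey}')
--     # the algorithm works to google tiles, so convert to tms
--     if not google:
--         y = (2 ** z - 1) - y
--     return (x, y, z)
-- ===== SOURCE B (Python) =====
-- def quadkey_to_tms(quadkey, google=False):
--     assert isinstance(quadkey, str), 'quadkey must be a string'
--     if not set(quadkey) <= set('0123'):
--         raise ValueError(f'Invalid QuadKey digit sequence: {quadkey}')
--     z = len(quadkey)
--     # the quadkey digits, read as one base-4 number, form the Morton
--     # (bit-interleaved) code of (x, y); deinterleave it arithmetically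
--     n = int(quadkey, 4) if quadkey else 0
--     x = y = 0
--     bit = 1
--     while n:
--         n, d = divmod(n, 4)
--         x += (d & 1) * bit
--         y += (d >> 1) * bit
--         bit <<= 1
--     if not google:
--         y = (2 ** z - 1) - y
--     return (x, y, z)
-- ===== Notes on version B (the rewrite author's own statement) =====
-- stated objective: alternative
-- what changed: Instead of A's per-character masked-OR loop with in-loop validation, B validates via a set-subset test, parses the whole quadkey as one base-4 integer with int(quadkey, 4) (a Morton/bit-interleaved code of x and y), and deinterleaves that integer arithmetically with a divmod loop.
import Mathlib
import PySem

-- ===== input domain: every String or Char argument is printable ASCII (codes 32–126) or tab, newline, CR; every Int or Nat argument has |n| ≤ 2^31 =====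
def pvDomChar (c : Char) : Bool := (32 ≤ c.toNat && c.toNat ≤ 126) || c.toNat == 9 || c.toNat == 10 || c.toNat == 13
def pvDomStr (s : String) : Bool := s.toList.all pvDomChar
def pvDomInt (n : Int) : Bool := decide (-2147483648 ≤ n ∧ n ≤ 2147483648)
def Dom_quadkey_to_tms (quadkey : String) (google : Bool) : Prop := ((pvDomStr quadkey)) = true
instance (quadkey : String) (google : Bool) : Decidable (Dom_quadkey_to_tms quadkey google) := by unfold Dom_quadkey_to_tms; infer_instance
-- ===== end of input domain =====

-- B replaces A's per-character masked-OR loop (validation inside the loop) by a different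
-- algorithm: set-subset validation, then parsing the whole quadkey as ONE base-4 integer
-- (a Morton/bit-interleaved code of x and y) and deinterleaving it with a divmod loop.


-- ===== PORT A =====
-- one iteration of A's loop body: i counts down from z to 1, reads quadkey[z-i], ORs mask 1 << (i-1);
-- none models the ValueError on a non-quadkey digit (excluded by Pre_)
def qA_step (l : List Char) (z : Int) (st : Option (Int × Int)) (i : Int) : Option (Int × Int) :=
  match st with
  | none => none
  | some (x, y) =>
    let mask : Int := (1 : Int) <<< (i - 1).toNat
    match PySem.List.pyGet? l (z - i) with
    | none => none
    | some c =>
      if c = '0' then some (x, y)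
      else if c = '1' then some (PySem.Int.bor x mask, y)
      else if c = '2' then some (x, PySem.Int.bor y mask)
      else if c = '3' then some (PySem.Int.bor x mask, PySem.Int.bor y mask)
      else none

def quadkey_to_tms (quadkey : String) (google : Bool) : Int × Int × Int :=
  let l := quadkey.toList
  let z : Int := l.length
  match (PySem.List.pyRange z 0 (-1)).foldl (qA_step l z) (some (0, 0)) with
  | none => (0, 0, 0)   -- ValueError: Invalid QuadKey digit sequence (excluded by Pre_)
  | some (x, y) =>
    if !google then (x, (2 ^ z.toNat - 1) - y, z) else (x, y, z)

-- ===== PORT B =====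
-- base-4 digit value of a char; 'int(quadkey, 4)' is exactly this fold on the strings of
-- '0'..'3' digits B calls it on (validation has already succeeded there)
def qDig (c : Char) : Nat := c.toNat - 48
def qBase4 (l : List Char) : Nat := l.foldl (fun a c => 4 * a + qDig c) 0

-- B's 'while n: n, d = divmod(n, 4); x += (d & 1) * bit; y += (d >> 1) * bit; bit <<= 1'
-- (for d in 0..3, d & 1 = d % 2 and d >> 1 = d / 2)
def qDeint (n : Nat) (bit x y : Int) : Int × Int :=
  if h : n = 0 then (x, y)
  else qDeint (n / 4) (bit * 2) (x + ((n % 4 % 2 : Nat) : Int) * bit) (y + ((n % 4 / 2 : Nat) : Int) * bit)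
termination_by n
decreasing_by exact Nat.div_lt_self (Nat.pos_of_ne_zero h) (by norm_num)

def quadkey_to_tms_alt (quadkey : String) (google : Bool) : Int × Int × Int :=
  let l := quadkey.toList
  if PySem.Set.issubset (PySem.Set.ofList l) ['0', '1', '2', '3'] = false then
    (0, 0, 0)   -- ValueError: Invalid QuadKey digit sequence (excluded by Pre_)
  else
    let z : Int := l.length
    let n : Nat := if l.isEmpty then 0 else qBase4 l
    match qDeint n 1 0 0 with
    | (x, y) => if !google then (x, (2 ^ z.toNat - 1) - y, z) else (x, y, z)

-- ===== PRECONDITION & SPEC =====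
-- Pre_ excludes exactly the strings containing a non-quadkey-digit character, on which A raises ValueError.
def Pre_quadkey_to_tms (quadkey : String) (google : Bool) : Prop :=
  quadkey.toList.all (fun c => c = '0' ∨ c = '1' ∨ c = '2' ∨ c = '3') = true
instance (quadkey : String) (google : Bool) : Decidable (Pre_quadkey_to_tms quadkey google) := by unfold Pre_quadkey_to_tms; infer_instance
def pvWitness_quadkey_to_tms : String × Bool := ("0213", false)

def Spec_quadkey_to_tms (quadkey : String) (google : Bool) (out : Int × Int × Int) : Prop := out = quadkey_to_tms_alt quadkey google
instance (quadkey : String) (google : Bool) (out : Int × Int × Int) : Decidable (Spec_quadkey_to_tms quadkey google out) := by unfold Spec_quadkey_to_tms; infer_instance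

-- ===== CLAIM (what is proved, stated in full; the proofs are below) =====
def Claim_equal_quadkey_to_tms : Prop := ∀ (quadkey : String) (google : Bool), Dom_quadkey_to_tms quadkey google → Pre_quadkey_to_tms quadkey google → Spec_quadkey_to_tms quadkey google (quadkey_to_tms quadkey google)

-- ===== LEMMAS AND PROOFS =====

-- a power of two ORed into a multiple of the next power of two is just added
theorem qNatLor (k : ℕ) : ∀ q : ℕ, q * 2 ^ (k + 1) ||| 2 ^ k = q * 2 ^ (k + 1) + 2 ^ k := by
  induction k with
  | zero =>
    intro q
    have h1 : q * 2 ^ (0 + 1) = Nat.bit false q := by simp [Nat.bit_val]; try ring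
    have h2 : (2 : ℕ) ^ 0 = Nat.bit true 0 := by simp [Nat.bit_val]
    rw [h2, h1, Nat.lor_bit]
    simp [Nat.bit_val]
  | succ k ih =>
    intro q
    have h1 : q * 2 ^ (k + 1 + 1) = Nat.bit false (q * 2 ^ (k + 1)) := by simp [Nat.bit_val]; ring
    have h2 : (2 : ℕ) ^ (k + 1) = Nat.bit false (2 ^ k) := by simp [Nat.bit_val]; ring
    rw [h2, h1, Nat.lor_bit, ih q]
    simp [Nat.bit_val]; ring

theorem qIntLor (k : ℕ) (x : ℤ) (q : ℕ) (hx : x = (q : ℤ) * 2 ^ (k + 1)) :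
    PySem.Int.bor x ((1 : Int) <<< k) = x + 2 ^ k := by
  subst hx
  have h1 : ((q : ℤ) * 2 ^ (k + 1)) = ((q * 2 ^ (k + 1) : ℕ) : ℤ) := by push_cast; ring
  have h2 : ((1 : Int) <<< k) = ((2 ^ k : ℕ) : ℤ) := by simp [Int.shiftLeft_eq]
  rw [h1, h2, PySem.Int.bor_natCast, qNatLor k q]
  push_cast; ring

theorem qGetCons (c : Char) (t : List Char) (j : ℤ) (hj : 1 ≤ j) :
    PySem.List.pyGet? (c :: t) j = PySem.List.pyGet? t (j - 1) := by
  rw [PySem.List.pyGet?_of_nonneg (c :: t) (by omega), PySem.List.pyGet?_of_nonneg t (by omega)]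
  have : j.toNat = (j - 1).toNat + 1 := by omega
  rw [this]
  simp

def qValid (l : List Char) : Prop := ∀ c ∈ l, c = '0' ∨ c = '1' ∨ c = '2' ∨ c = '3'

-- the (xbit, ybit) of a valid digit
def qbit (c : Char) : Int × Int :=
  if c = '0' then (0, 0) else if c = '1' then (1, 0) else if c = '2' then (0, 1) else (1, 1)

theorem qbit0 : qbit '0' = ((0 : ℤ), (0 : ℤ)) := rfl
theorem qbit1 : qbit '1' = ((1 : ℤ), (0 : ℤ)) := rfl
theorem qbit2 : qbit '2' = ((0 : ℤ), (1 : ℤ)) := rfl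
theorem qbit3 : qbit '3' = ((1 : ℤ), (1 : ℤ)) := rfl

-- proof-side shift-accumulate pass (the common reference both ports are compared to)
def qB_step (st : Option (Int × Int)) (ch : Char) : Option (Int × Int) :=
  match st with
  | none => none
  | some (x, y) =>
    if ch = '0' ∨ ch = '1' ∨ ch = '2' ∨ ch = '3' then
      some (x * 2 + (qbit ch).1, y * 2 + (qbit ch).2)
    else none

theorem qB_step_some (x y : ℤ) (c : Char) (hc : c = '0' ∨ c = '1' ∨ c = '2' ∨ c = '3') :
    qB_step (some (x, y)) c = some (x * 2 + (qbit c).1, y * 2 + (qbit c).2) := by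
  rcases hc with rfl | rfl | rfl | rfl <;> rfl

-- starting the reference loop from (x, y) shifts the result of starting it from (0, 0)
theorem qB_shift (l : List Char) (h : qValid l) : ∀ x y : ℤ,
    l.foldl qB_step (some (x, y)) =
      (l.foldl qB_step (some (0, 0))).map
        (fun p => (x * 2 ^ l.length + p.1, y * 2 ^ l.length + p.2)) := by
  induction l with
  | nil => intro x y; simp
  | cons c t ih =>
    intro x y
    have hv : qValid t := fun d hd => h d (List.mem_cons_of_mem c hd)
    have hc := h c List.mem_cons_self
    rw [List.foldl_cons, List.foldl_cons, qB_step_some x y c hc, qB_step_some 0 0 c hc,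
      ih hv (x * 2 + (qbit c).1) (y * 2 + (qbit c).2),
      ih hv (0 * 2 + (qbit c).1) (0 * 2 + (qbit c).2), Option.map_map]
    apply congrArg₂ _ _ rfl
    funext p
    simp only [Function.comp_apply, List.length_cons, pow_succ, Prod.mk.injEq]
    constructor <;> ring

-- the reference loop never fails on a valid string, and its accumulators stay in [0, 2^len)
theorem qB_some (l : List Char) (h : qValid l) :
    ∃ a b : ℤ, l.foldl qB_step (some (0, 0)) = some (a, b) ∧
      0 ≤ a ∧ a < 2 ^ l.length ∧ 0 ≤ b ∧ b < 2 ^ l.length := by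
  induction l with
  | nil => exact ⟨0, 0, rfl, by norm_num⟩
  | cons c t ih =>
    have hv : qValid t := fun d hd => h d (List.mem_cons_of_mem c hd)
    have hc := h c List.mem_cons_self
    obtain ⟨a, b, he, ha0, ha, hb0, hb⟩ := ih hv
    have hpos : (0 : ℤ) < 2 ^ t.length := by positivity
    refine ⟨(qbit c).1 * 2 ^ t.length + a, (qbit c).2 * 2 ^ t.length + b, ?_, ?_, ?_, ?_, ?_⟩
    · rw [List.foldl_cons, qB_step_some 0 0 c hc, qB_shift t hv, he]
      simp only [Option.map_some, Option.some.injEq, Prod.mk.injEq]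
      constructor <;> ring
    all_goals
      rcases hc with rfl | rfl | rfl | rfl <;>
        simp only [qbit0, qbit1, qbit2, qbit3, List.length_cons, pow_succ] <;> norm_num <;> linarith

-- evaluating the first iteration of A's countdown loop (i = z = len+1, mask = 2^len)
theorem qA_step_head (c : Char) (t : List Char) (x y : ℤ) (qx qy : ℕ)
    (hc : c = '0' ∨ c = '1' ∨ c = '2' ∨ c = '3')
    (hx : x = (qx : ℤ) * 2 ^ (t.length + 1)) (hy : y = (qy : ℤ) * 2 ^ (t.length + 1)) :
    qA_step (c :: t) ((t.length : ℤ) + 1) (some (x, y)) ((t.length : ℤ) + 1) =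
      some (x + (qbit c).1 * 2 ^ t.length, y + (qbit c).2 * 2 ^ t.length) := by
  simp only [qA_step]
  have hz : (t.length : ℤ) + 1 - ((t.length : ℤ) + 1) = 0 := by ring
  have hm : ((t.length : ℤ) + 1 - 1).toNat = t.length := by omega
  rw [hz, PySem.List.pyGet?_zero_cons, hm]
  rcases hc with rfl | rfl | rfl | rfl <;>
    simp only [qbit0, qbit1, qbit2, qbit3, Char.reduceEq, reduceIte] <;>
    [skip;
     rw [qIntLor t.length x qx hx];
     rw [qIntLor t.length y qy hy];
     rw [qIntLor t.length x qx hx, qIntLor t.length y qy hy]] <;>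
    norm_num

-- A's countdown loop, started from accumulators that are multiples of 2^len, adds the reference result
theorem qA_eq_qB (l : List Char) (h : qValid l) : ∀ (x y : ℤ) (qx qy : ℕ),
    x = (qx : ℤ) * 2 ^ l.length → y = (qy : ℤ) * 2 ^ l.length →
    ∀ a b : ℤ, l.foldl qB_step (some (0, 0)) = some (a, b) →
    (PySem.List.pyRange (l.length : ℤ) 0 (-1)).foldl (qA_step l (l.length : ℤ)) (some (x, y)) =
      some (x + a, y + b) := by
  induction l with
  | nil =>
    intro x y qx qy hx hy a b hB
    simp only [List.foldl_nil, Option.some.injEq, Prod.mk.injEq] at hB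
    obtain ⟨ha, hb⟩ := hB
    rw [PySem.List.pyRange_neg_one_eq_nil (by simp), List.foldl_nil, ← ha, ← hb]
    norm_num
  | cons c t ih =>
    intro x y qx qy hx hy a b hB
    have hv : qValid t := fun d hd => h d (List.mem_cons_of_mem c hd)
    have hc := h c List.mem_cons_self
    have hn : ((c :: t).length : ℤ) = (t.length : ℤ) + 1 := by push_cast [List.length_cons]; ring
    have hlen : x = (qx : ℤ) * 2 ^ (t.length + 1) := by rwa [List.length_cons] at hx
    have hleny : y = (qy : ℤ) * 2 ^ (t.length + 1) := by rwa [List.length_cons] at hy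
    rw [hn, PySem.List.pyRange_neg_one_cons (by positivity)]
    have hn1 : (t.length : ℤ) + 1 - 1 = (t.length : ℤ) := by ring
    rw [List.foldl_cons, qA_step_head c t x y qx qy hc hlen hleny, hn1]
    -- the remaining iterations read only indices 1..len of c::t, i.e. t shifted by one
    rw [PySem.List.foldl_congr_mem _ (qA_step (c :: t) ((t.length : ℤ) + 1))
        (qA_step t (t.length : ℤ)) _ ?_]
    · -- the reference run on c::t in terms of its run on t
      rw [List.foldl_cons, qB_step_some 0 0 c hc, qB_shift t hv] at hB
      rcases he : t.foldl qB_step (some (0, 0)) with _ | ⟨a0, b0⟩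
      · rw [he] at hB; simp at hB
      · rw [he] at hB
        simp only [Option.map_some, Option.some.injEq, Prod.mk.injEq] at hB
        obtain ⟨hba, hbb⟩ := hB
        rcases hc with rfl | rfl | rfl | rfl <;>
          simp only [qbit0, qbit1, qbit2, qbit3] at hba hbb ⊢ <;>
          [ (have := ih hv (x + 0 * 2 ^ t.length) (y + 0 * 2 ^ t.length) (2 * qx) (2 * qy)
              (by push_cast; rw [hlen]; ring) (by push_cast; rw [hleny]; ring) a0 b0 he);
            (have := ih hv (x + 1 * 2 ^ t.length) (y + 0 * 2 ^ t.length) (2 * qx + 1) (2 * qy)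
              (by push_cast; rw [hlen]; ring) (by push_cast; rw [hleny]; ring) a0 b0 he);
            (have := ih hv (x + 0 * 2 ^ t.length) (y + 1 * 2 ^ t.length) (2 * qx) (2 * qy + 1)
              (by push_cast; rw [hlen]; ring) (by push_cast; rw [hleny]; ring) a0 b0 he);
            (have := ih hv (x + 1 * 2 ^ t.length) (y + 1 * 2 ^ t.length) (2 * qx + 1) (2 * qy + 1)
              (by push_cast; rw [hlen]; ring) (by push_cast; rw [hleny]; ring) a0 b0 he) ] <;>
          rw [this] <;> rw [← hba, ← hbb] <;> simp only [Option.some.injEq, Prod.mk.injEq] <;>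
          constructor <;> ring
    · -- step functions agree on indices 1..len
      intro acc i hi
      obtain ⟨hi0, hi1⟩ := PySem.List.mem_pyRange_neg_one.mp hi
      rcases acc with _ | ⟨u, v⟩
      · rfl
      · simp only [qA_step]
        rw [show (t.length : ℤ) + 1 - i = ((t.length : ℤ) - i) + 1 by ring,
          qGetCons c t _ (by omega)]
        norm_num

-- the x and y bit-streams of a Morton code, LSB first
def qX (n : Nat) : Int :=
  if h : n = 0 then 0 else ((n % 4 % 2 : Nat) : Int) + 2 * qX (n / 4)
termination_by n
decreasing_by exact Nat.div_lt_self (Nat.pos_of_ne_zero h) (by norm_num)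

def qY (n : Nat) : Int :=
  if h : n = 0 then 0 else ((n % 4 / 2 : Nat) : Int) + 2 * qY (n / 4)
termination_by n
decreasing_by exact Nat.div_lt_self (Nat.pos_of_ne_zero h) (by norm_num)

-- B's divmod loop computes qX/qY, shifted into its accumulators
theorem qDeint_eq (n : Nat) : ∀ bit x y : Int,
    qDeint n bit x y = (x + bit * qX n, y + bit * qY n) := by
  induction n using Nat.strong_induction_on with
  | _ n ih =>
    intro bit x y
    by_cases h : n = 0
    · subst h
      rw [qDeint, qX, qY]
      simp
    · rw [qDeint, qX, qY]
      simp only [h, dite_false]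
      rw [ih (n / 4) (Nat.div_lt_self (Nat.pos_of_ne_zero h) (by norm_num))]
      simp only [Prod.mk.injEq]
      constructor <;> ring

theorem qX_step (q d : Nat) (hd : d < 4) : qX (4 * q + d) = ((d % 2 : Nat) : Int) + 2 * qX q := by
  by_cases h : 4 * q + d = 0
  · have hq : q = 0 := by omega
    have hdz : d = 0 := by omega
    subst hq; subst hdz
    rw [qX]; simp
  · rw [qX]
    simp only [h, dite_false]
    have h1 : (4 * q + d) % 4 = d := by omega
    have h2 : (4 * q + d) / 4 = q := by omega
    rw [h1, h2]

theorem qY_step (q d : Nat) (hd : d < 4) : qY (4 * q + d) = ((d / 2 : Nat) : Int) + 2 * qY q := by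
  by_cases h : 4 * q + d = 0
  · have hq : q = 0 := by omega
    have hdz : d = 0 := by omega
    subst hq; subst hdz
    rw [qY]; simp
  · rw [qY]
    simp only [h, dite_false]
    have h1 : (4 * q + d) % 4 = d := by omega
    have h2 : (4 * q + d) / 4 = q := by omega
    rw [h1, h2]

theorem qBase4_append (l : List Char) (c : Char) :
    qBase4 (l ++ [c]) = 4 * qBase4 l + qDig c := by
  simp [qBase4, List.foldl_append]

-- the reference loop equals (qX, qY) of the base-4 value
theorem qRef_eq_morton (l : List Char) (h : qValid l) :
    l.foldl qB_step (some (0, 0)) = some (qX (qBase4 l), qY (qBase4 l)) := by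
  induction l using List.reverseRecOn with
  | nil =>
    have : qBase4 [] = 0 := rfl
    rw [this, qX, qY]; simp
  | append_singleton t c ih =>
    have hv : qValid t := fun d hd => h d (List.mem_append_left _ hd)
    have hc : c = '0' ∨ c = '1' ∨ c = '2' ∨ c = '3' := h c (List.mem_append_right _ (List.mem_singleton_self c))
    have hd4 : qDig c < 4 := by rcases hc with rfl | rfl | rfl | rfl <;> decide
    rw [List.foldl_append, ih hv, List.foldl_cons, List.foldl_nil,
      qB_step_some _ _ c hc, qBase4_append, qX_step _ _ hd4, qY_step _ _ hd4]
    have hb : qbit c = (((qDig c % 2 : Nat) : Int), ((qDig c / 2 : Nat) : Int)) := by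
      rcases hc with rfl | rfl | rfl | rfl <;> rfl
    rw [hb]
    simp only [Option.some.injEq, Prod.mk.injEq]
    constructor <;> ring

-- ===== VERDICT (by name: the statement is the Claim_ definition above) =====
theorem quadkey_to_tms_spec : Claim_equal_quadkey_to_tms := by
  intro quadkey google _ hpre
  unfold Spec_quadkey_to_tms quadkey_to_tms quadkey_to_tms_alt
  have hv : qValid quadkey.toList := by
    intro c hc
    have := List.all_eq_true.mp hpre c hc
    simpa using this
  -- B's validation succeeds
  have hsub : PySem.Set.issubset (PySem.Set.ofList quadkey.toList) ['0', '1', '2', '3'] = true := by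
    rw [PySem.Set.issubset_iff]
    intro x hx
    have hx' : x ∈ quadkey.toList := by
      exact (PySem.Set.mem_ofList _ _).mp hx
    rcases hv x hx' with rfl | rfl | rfl | rfl <;> simp
  obtain ⟨a, b, he, _⟩ := qB_some quadkey.toList hv
  have hmain := qA_eq_qB quadkey.toList hv 0 0 0 0 (by simp) (by simp) a b he
  have hl : quadkey.toList.length = quadkey.length := by simp
  rw [hl] at hmain
  have hmor := qRef_eq_morton quadkey.toList hv
  rw [he] at hmor
  obtain ⟨ha, hb⟩ : a = qX (qBase4 quadkey.toList) ∧ b = qY (qBase4 quadkey.toList) := by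
    simpa using hmor
  have hn : (if quadkey.toList.isEmpty then 0 else qBase4 quadkey.toList) = qBase4 quadkey.toList := by
    cases h : quadkey.toList <;> simp [qBase4]
  simp only [hsub, Bool.true_eq_false, if_false, hn, hmain, qDeint_eq, ← ha, ← hb, hl]
  simp
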